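-- pv_equiv track=rewrite | github.com/sedalhoseini/punisher-bot | lingo.py | parse_ai_response
-- ===== SOURCE A (Python) =====
-- def normalize_level(text):
--     """Converts strange levels like 'Beginner' to 'A1'."""
--     if not text: return "Unknown"
--     text = text.lower().strip()
--
--     # Direct Matches
--     if "a1" in text: return "A1"
--     if "a2" in text: return "A2"
--     if "b1" in text: return "B1"
--     if "b2" in text: return "B2"
--     if "c1" in text: return "C1"
--     if "c2" in text: return "C2"
--
--     # Keyword Matches
--     if "beginner" in text or "basic" in text: return "A1"
--     if "elementary" in text: return "A2"
--     if "intermediate" in text and "upper" not in text: return "B1"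
--     if "upper-intermediate" in text or "upper intermediate" in text: return "B2"
--     if "advanced" in text: return "C1"
--     if "proficiency" in text: return "C2"
--
--     return "Unknown" # fallback
--
-- def parse_ai_response(text, original_word):
--     items = []
--     current = {}
--     for line in text.splitlines():
--         line = line.strip()
--         if not line or line.startswith("---") or line.startswith("Item"):
--             if current and "definition" in current: items.append(current)
--             current = {"word": original_word, "source": "AI-Enhanced"}
--             continue
--         if line.startswith("POS:"): current["parts"] = line.replace("POS:", "").strip()
--         elif line.startswith("Level:"): current["level"] = normalize_level(line.replace("Level:", "").strip()) # NORMALIZED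
--         elif line.startswith("Def:"): current["definition"] = line.replace("Def:", "").strip()
--         elif line.startswith("Ex:"): current["example"] = line.replace("Ex:", "").strip()
--         elif line.startswith("Pron:"): current["pronunciation"] = line.replace("Pron:", "").strip()
--     if current and "definition" in current: items.append(current)
--     return items
-- ===== SOURCE B (Python) =====
-- def normalize_level(text):
--     if not text: return "Unknown"
--     t = text.lower().strip()
--     for code in ("a1", "a2", "b1", "b2", "c1", "c2"):
--         if code in t: return code.upper()
--     if "beginner" in t or "basic" in t: return "A1"
--     if "elementary" in t: return "A2"
--     if "intermediate" in t and "upper" not in t: return "B1"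
--     if "upper-intermediate" in t or "upper intermediate" in t: return "B2"
--     if "advanced" in t: return "C1"
--     if "proficiency" in t: return "C2"
--     return "Unknown"
--
-- FIELDS = [("POS:", "parts"), ("Level:", "level"), ("Def:", "definition"),
--           ("Ex:", "example"), ("Pron:", "pronunciation")]
--
-- def parse_ai_response(text, original_word):
--     # Pass 1: group stripped lines into blocks, splitting at separator lines.
--     lines = [l.strip() for l in text.splitlines()]
--     blocks, run = [], []
--     for l in lines:
--         if not l or l.startswith("---") or l.startswith("Item"):
--             blocks.append(run)
--             run = []
--         else:
--             run.append(l)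
--     blocks.append(run)
--     # Pass 2: parse each block independently; keep it only if it has a definition.
--     items = []
--     for blk in blocks:
--         d = {"word": original_word, "source": "AI-Enhanced"}
--         for l in blk:
--             for prefix, key in FIELDS:
--                 if l.startswith(prefix):
--                     val = l.replace(prefix, "").strip()
--                     d[key] = normalize_level(val) if key == "level" else val
--                     break
--         if "definition" in d:
--             items.append(d)
--     return items
-- ===== Notes on version B (the rewrite author's own statement) =====
-- stated objective: alternative
-- what changed: B replaces A's single-pass streaming accumulator (dict reset at each separator line) with a group-then-parse decomposition: a first pass splits the stripped lines into blocks at separator lines, then each block is parsed independently from a uniform {'word','source'} seed via a prefix/field table and kept only if it gained a definition.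
-- intended difference: On texts whose lines before the first separator line (blank, '---' or 'Item') contain a 'Def:' field, A emits that first item without the 'word' and 'source' entries (its initial dict is accidentally left unseeded), while B emits it with 'word' and 'source' like every other item, which is the intended record shape. — e.g. on parse_ai_response("Def: a cat", "cat"): A returns [[("definition", "a cat")]], B returns [[("word", "cat"), ("source", "AI-Enhanced"), ("definition", "a cat")]]
import Mathlib
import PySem

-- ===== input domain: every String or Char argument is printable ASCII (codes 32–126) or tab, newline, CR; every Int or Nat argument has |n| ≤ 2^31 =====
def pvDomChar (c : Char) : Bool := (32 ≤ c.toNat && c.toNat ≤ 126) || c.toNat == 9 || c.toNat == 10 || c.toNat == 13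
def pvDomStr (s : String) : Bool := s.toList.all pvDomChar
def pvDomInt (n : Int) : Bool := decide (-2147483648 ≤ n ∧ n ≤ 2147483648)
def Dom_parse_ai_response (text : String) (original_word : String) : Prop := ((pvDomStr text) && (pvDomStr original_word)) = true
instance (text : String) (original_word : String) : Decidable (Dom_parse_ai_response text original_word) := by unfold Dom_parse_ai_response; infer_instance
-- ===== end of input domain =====

-- B parses the text group-then-parse (split stripped lines into blocks at separator lines, parse each
-- block independently from a uniform seed) instead of A's streaming accumulator; objective: alternative
-- decomposition. B intentionally differs from A on first-block items (see D_ below).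

-- ===== PORT A =====
def pvNormalizeLevel (text : String) : String :=
  if text == "" then "Unknown" else
  let t := PySem.Str.strip (PySem.Str.lower text)
  if PySem.Str.isIn "a1" t then "A1" else
  if PySem.Str.isIn "a2" t then "A2" else
  if PySem.Str.isIn "b1" t then "B1" else
  if PySem.Str.isIn "b2" t then "B2" else
  if PySem.Str.isIn "c1" t then "C1" else
  if PySem.Str.isIn "c2" t then "C2" else
  if PySem.Str.isIn "beginner" t || PySem.Str.isIn "basic" t then "A1" else
  if PySem.Str.isIn "elementary" t then "A2" else
  if PySem.Str.isIn "intermediate" t && !(PySem.Str.isIn "upper" t) then "B1" else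
  if PySem.Str.isIn "upper-intermediate" t || PySem.Str.isIn "upper intermediate" t then "B2" else
  if PySem.Str.isIn "advanced" t then "C1" else
  if PySem.Str.isIn "proficiency" t then "C2" else
  "Unknown"

def pvStepA (original_word : String)
    (st : List (PySem.Dict String String) × PySem.Dict String String) (line0 : String) :
    List (PySem.Dict String String) × PySem.Dict String String :=
  let line := PySem.Str.strip line0
  if line == "" || PySem.Str.startswith line "---" || PySem.Str.startswith line "Item" then
    (if st.2.size != 0 && st.2.contains "definition" then st.1 ++ [st.2] else st.1,
     (PySem.Dict.empty.insert "word" original_word).insert "source" "AI-Enhanced")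
  else
    if PySem.Str.startswith line "POS:" then
      (st.1, st.2.insert "parts" (PySem.Str.strip (PySem.Str.replace line "POS:" "")))
    else if PySem.Str.startswith line "Level:" then
      (st.1, st.2.insert "level" (pvNormalizeLevel (PySem.Str.strip (PySem.Str.replace line "Level:" ""))))
    else if PySem.Str.startswith line "Def:" then
      (st.1, st.2.insert "definition" (PySem.Str.strip (PySem.Str.replace line "Def:" "")))
    else if PySem.Str.startswith line "Ex:" then
      (st.1, st.2.insert "example" (PySem.Str.strip (PySem.Str.replace line "Ex:" "")))
    else if PySem.Str.startswith line "Pron:" then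
      (st.1, st.2.insert "pronunciation" (PySem.Str.strip (PySem.Str.replace line "Pron:" "")))
    else st

def parse_ai_response (text : String) (original_word : String) : List (List (String × String)) :=
  let st := (PySem.Str.splitlines text).foldl (pvStepA original_word) ([], PySem.Dict.empty)
  let items := if st.2.size != 0 && st.2.contains "definition" then st.1 ++ [st.2] else st.1
  items.map (fun d => d.items)

-- ===== PORT B =====
def pvBNormCodeLoop (t : String) : List String → Option String
  | [] => none
  | c :: rest => if PySem.Str.isIn c t then some (PySem.Str.upper c) else pvBNormCodeLoop t rest

def pvBNormalizeLevel (text : String) : String :=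
  if text == "" then "Unknown" else
  let t := PySem.Str.strip (PySem.Str.lower text)
  match pvBNormCodeLoop t ["a1", "a2", "b1", "b2", "c1", "c2"] with
  | some r => r
  | none =>
    if PySem.Str.isIn "beginner" t || PySem.Str.isIn "basic" t then "A1" else
    if PySem.Str.isIn "elementary" t then "A2" else
    if PySem.Str.isIn "intermediate" t && !(PySem.Str.isIn "upper" t) then "B1" else
    if PySem.Str.isIn "upper-intermediate" t || PySem.Str.isIn "upper intermediate" t then "B2" else
    if PySem.Str.isIn "advanced" t then "C1" else
    if PySem.Str.isIn "proficiency" t then "C2" else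
    "Unknown"

def pvBFields : List (String × String) :=
  [("POS:", "parts"), ("Level:", "level"), ("Def:", "definition"),
   ("Ex:", "example"), ("Pron:", "pronunciation")]

-- inner `for prefix, key in FIELDS: … break` loop of Source B
def pvBFill (d : PySem.Dict String String) (l : String) : List (String × String) → PySem.Dict String String
  | [] => d
  | (pre, key) :: rest =>
    if PySem.Str.startswith l pre then
      let val := PySem.Str.strip (PySem.Str.replace l pre "")
      d.insert key (if key == "level" then pvBNormalizeLevel val else val)
    else pvBFill d l rest

-- pass 1 of Source B: group stripped lines into blocks at separator lines
def pvBStep (st : List (List String) × List String) (l : String) :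
    List (List String) × List String :=
  if l == "" || PySem.Str.startswith l "---" || PySem.Str.startswith l "Item" then
    (st.1 ++ [st.2], [])
  else
    (st.1, st.2 ++ [l])

def parse_ai_response_alt (text : String) (original_word : String) : List (List (String × String)) :=
  let lines := (PySem.Str.splitlines text).map PySem.Str.strip
  let st := lines.foldl pvBStep ([], [])
  let blocks := st.1 ++ [st.2]
  let items := blocks.foldl (fun acc blk =>
    let d := blk.foldl (fun d l => pvBFill d l pvBFields)
      ((PySem.Dict.empty.insert "word" original_word).insert "source" "AI-Enhanced")
    if d.contains "definition" then acc ++ [d] else acc) []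
  items.map (fun d => d.items)

-- ===== PRECONDITION & SPEC =====
-- On texts whose lines before the first separator line (blank, '---' or 'Item') contain a 'Def:' field,
-- A emits that first item without the 'word'/'source' entries (its initial dict is accidentally left
-- unseeded), while B emits it with 'word' and 'source' like every other item — the intended record shape.
def D_parse_ai_response (text : String) (original_word : String) : Prop :=
  ((((PySem.Str.splitlines text).map PySem.Str.strip).takeWhile
      (fun l => !(decide (l = "") || "---".toList.isPrefixOf l.toList
                  || "Item".toList.isPrefixOf l.toList))).any
    (fun l => "Def:".toList.isPrefixOf l.toList)) = true
instance (text : String) (original_word : String) : Decidable (D_parse_ai_response text original_word) := by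
  unfold D_parse_ai_response; infer_instance

def Spec_parse_ai_response (text : String) (original_word : String) (out : List (List (String × String))) : Prop :=
  ¬ D_parse_ai_response text original_word → out = parse_ai_response_alt text original_word
instance (text : String) (original_word : String) (out : List (List (String × String))) :
    Decidable (Spec_parse_ai_response text original_word out) := by
  unfold Spec_parse_ai_response; infer_instance

def pvDiffWitness_parse_ai_response : String × String := ("Def: a cat", "cat")
def pvDiffWitnessOut_parse_ai_response :
    (List (List (String × String))) × (List (List (String × String))) :=
  ([[("definition", "a cat")]],
   [[("word", "cat"), ("source", "AI-Enhanced"), ("definition", "a cat")]])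

-- ===== CLAIM (what is proved, stated in full; the proofs are below) =====
def Claim_unchanged_parse_ai_response : Prop := ∀ (text : String) (original_word : String),
  Dom_parse_ai_response text original_word →
  Spec_parse_ai_response text original_word (parse_ai_response text original_word)

def Claim_changed_parse_ai_response : Prop :=
  Dom_parse_ai_response (pvDiffWitness_parse_ai_response.1) (pvDiffWitness_parse_ai_response.2) ∧
  D_parse_ai_response (pvDiffWitness_parse_ai_response.1) (pvDiffWitness_parse_ai_response.2) ∧
  parse_ai_response (pvDiffWitness_parse_ai_response.1) (pvDiffWitness_parse_ai_response.2) = pvDiffWitnessOut_parse_ai_response.1 ∧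
  parse_ai_response_alt (pvDiffWitness_parse_ai_response.1) (pvDiffWitness_parse_ai_response.2) = pvDiffWitnessOut_parse_ai_response.2 ∧
  pvDiffWitnessOut_parse_ai_response.1 ≠ pvDiffWitnessOut_parse_ai_response.2

def Claim_exact_parse_ai_response : Prop := ∀ (text : String) (original_word : String),
  Dom_parse_ai_response text original_word → D_parse_ai_response text original_word →
  parse_ai_response text original_word ≠ parse_ai_response_alt text original_word

-- ===== LEMMAS AND PROOFS =====

def pvBnd (l : String) : Bool :=
  l == "" || PySem.Str.startswith l "---" || PySem.Str.startswith l "Item"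

lemma pv_pre_alt (l p : String) : p.toList.isPrefixOf l.toList = PySem.Str.startswith l p := by
  rw [Bool.eq_iff_iff, List.isPrefixOf_iff_prefix]
  simp [PySem.Chars.startswith_iff]


lemma pv_bnd_alt (l : String) :
    (decide (l = "") || "---".toList.isPrefixOf l.toList || "Item".toList.isPrefixOf l.toList)
      = pvBnd l := by
  unfold pvBnd
  rw [pv_pre_alt, pv_pre_alt, Bool.eq_iff_iff]
  simp

def pvSeed0 (ow : String) : PySem.Dict String String :=
  (PySem.Dict.empty.insert "word" ow).insert "source" "AI-Enhanced"

def pvEmit (d : PySem.Dict String String) : List (PySem.Dict String String) :=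
  if d.contains "definition" then [d] else []

def pvFillA (d : PySem.Dict String String) (line : String) : PySem.Dict String String :=
  if PySem.Str.startswith line "POS:" then
    d.insert "parts" (PySem.Str.strip (PySem.Str.replace line "POS:" ""))
  else if PySem.Str.startswith line "Level:" then
    d.insert "level" (pvNormalizeLevel (PySem.Str.strip (PySem.Str.replace line "Level:" "")))
  else if PySem.Str.startswith line "Def:" then
    d.insert "definition" (PySem.Str.strip (PySem.Str.replace line "Def:" ""))
  else if PySem.Str.startswith line "Ex:" then
    d.insert "example" (PySem.Str.strip (PySem.Str.replace line "Ex:" ""))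
  else if PySem.Str.startswith line "Pron:" then
    d.insert "pronunciation" (PySem.Str.strip (PySem.Str.replace line "Pron:" ""))
  else d

-- middle semantics both programs are reduced to: streaming over STRIPPED lines
def pvRunM (ow : String) (cur : PySem.Dict String String) :
    List String → List (PySem.Dict String String)
  | [] => pvEmit cur
  | l :: ls =>
    if pvBnd l then pvEmit cur ++ pvRunM ow (pvSeed0 ow) ls
    else pvRunM ow (pvFillA cur l) ls

def pvFin (st : List (PySem.Dict String String) × PySem.Dict String String) :
    List (PySem.Dict String String) :=
  if st.2.size != 0 && st.2.contains "definition" then st.1 ++ [st.2] else st.1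

lemma pv_contains_size (d : PySem.Dict String String) (h : d.contains "definition" = true) :
    (d.size != 0) = true := by
  rcases d with ⟨items⟩
  cases items with
  | nil => simp [PySem.Dict.contains] at h
  | cons a t => simp [PySem.Dict.size]

lemma pv_fin_eq (items : List (PySem.Dict String String)) (d : PySem.Dict String String) :
    pvFin (items, d) = items ++ pvEmit d := by
  unfold pvFin pvEmit
  by_cases h : d.contains "definition" = true
  · simp [h, pv_contains_size d h]
  · simp [h]

lemma pv_stepA_eq (ow : String) (st : List (PySem.Dict String String) × PySem.Dict String String)
    (raw : String) :
    pvStepA ow st raw =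
      if pvBnd (PySem.Str.strip raw) then (pvFin st, pvSeed0 ow)
      else (st.1, pvFillA st.2 (PySem.Str.strip raw)) := by
  rcases st with ⟨items, cur⟩
  simp only [pvStepA, pvBnd, pvFin, pvSeed0, pvFillA]
  split_ifs <;> rfl

lemma pv_codeLoop (t : String) :
    pvBNormCodeLoop t ["a1", "a2", "b1", "b2", "c1", "c2"] =
      (if PySem.Str.isIn "a1" t then some "A1" else
       if PySem.Str.isIn "a2" t then some "A2" else
       if PySem.Str.isIn "b1" t then some "B1" else
       if PySem.Str.isIn "b2" t then some "B2" else
       if PySem.Str.isIn "c1" t then some "C1" else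
       if PySem.Str.isIn "c2" t then some "C2" else none) := by
  rw [pvBNormCodeLoop, pvBNormCodeLoop, pvBNormCodeLoop, pvBNormCodeLoop, pvBNormCodeLoop,
    pvBNormCodeLoop, pvBNormCodeLoop]
  split_ifs <;> rfl

set_option maxHeartbeats 4000000 in
lemma pv_norm_aux (u : String) :
    (match pvBNormCodeLoop u ["a1", "a2", "b1", "b2", "c1", "c2"] with
     | some r => r
     | none =>
       if PySem.Str.isIn "beginner" u || PySem.Str.isIn "basic" u then "A1" else
       if PySem.Str.isIn "elementary" u then "A2" else
       if PySem.Str.isIn "intermediate" u && !(PySem.Str.isIn "upper" u) then "B1" else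
       if PySem.Str.isIn "upper-intermediate" u || PySem.Str.isIn "upper intermediate" u then "B2" else
       if PySem.Str.isIn "advanced" u then "C1" else
       if PySem.Str.isIn "proficiency" u then "C2" else
       "Unknown")
    = (if PySem.Str.isIn "a1" u then "A1" else
       if PySem.Str.isIn "a2" u then "A2" else
       if PySem.Str.isIn "b1" u then "B1" else
       if PySem.Str.isIn "b2" u then "B2" else
       if PySem.Str.isIn "c1" u then "C1" else
       if PySem.Str.isIn "c2" u then "C2" else
       if PySem.Str.isIn "beginner" u || PySem.Str.isIn "basic" u then "A1" else
       if PySem.Str.isIn "elementary" u then "A2" else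
       if PySem.Str.isIn "intermediate" u && !(PySem.Str.isIn "upper" u) then "B1" else
       if PySem.Str.isIn "upper-intermediate" u || PySem.Str.isIn "upper intermediate" u then "B2" else
       if PySem.Str.isIn "advanced" u then "C1" else
       if PySem.Str.isIn "proficiency" u then "C2" else
       "Unknown") := by
  rw [pv_codeLoop]
  split_ifs <;> rfl

lemma pv_norm_eq (t : String) : pvBNormalizeLevel t = pvNormalizeLevel t := by
  rw [pvBNormalizeLevel, pvNormalizeLevel]
  by_cases h : (t == "") = true
  · rw [if_pos h, if_pos h]
  · rw [if_neg h, if_neg h]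
    exact pv_norm_aux (PySem.Str.strip (PySem.Str.lower t))

lemma pv_fill_eq (d : PySem.Dict String String) (l : String) :
    pvBFill d l pvBFields = pvFillA d l := by
  unfold pvBFill pvBFields pvFillA
  split_ifs <;> simp_all [pv_norm_eq, pvBFill]

lemma pvA_run (ow : String) (ls : List String) : ∀ (items : List (PySem.Dict String String))
    (cur : PySem.Dict String String),
    pvFin (ls.foldl (pvStepA ow) (items, cur))
      = items ++ pvRunM ow cur (ls.map PySem.Str.strip) := by
  induction ls with
  | nil => intro items cur; simpa [pvRunM] using pv_fin_eq items cur
  | cons raw ls ih =>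
    intro items cur
    rw [List.map_cons, List.foldl_cons, pv_stepA_eq]
    by_cases h : pvBnd (PySem.Str.strip raw) = true
    · rw [if_pos h, ih, pv_fin_eq]
      simp [pvRunM, h]
    · rw [if_neg (by simp [h]), ih]
      simp [pvRunM, h]

-- B-side abbreviations (definitionally the lambdas of the port)
def pvDOf (ow : String) (blk : List String) : PySem.Dict String String :=
  blk.foldl (fun d l => pvBFill d l pvBFields) (pvSeed0 ow)

def pvPass2 (ow : String) (blocks : List (List String)) :
    List (PySem.Dict String String) :=
  blocks.foldl (fun acc blk =>
    let d := blk.foldl (fun d l => pvBFill d l pvBFields)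
      ((PySem.Dict.empty.insert "word" ow).insert "source" "AI-Enhanced")
    if d.contains "definition" then acc ++ [d] else acc) []

lemma pv_pass2_snoc (ow : String) (blocks : List (List String)) (blk : List String) :
    pvPass2 ow (blocks ++ [blk]) = pvPass2 ow blocks ++ pvEmit (pvDOf ow blk) := by
  unfold pvPass2 pvEmit pvDOf pvSeed0
  rw [List.foldl_append]
  simp only [List.foldl_cons, List.foldl_nil]
  by_cases h : ((blk.foldl (fun d l => pvBFill d l pvBFields)
      ((PySem.Dict.empty.insert "word" ow).insert "source" "AI-Enhanced")).contains "definition") = true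
  · simp [h]
  · simp [h]

lemma pv_bstep_eq (st : List (List String) × List String) (l : String) :
    pvBStep st l =
      if pvBnd l then (st.1 ++ [st.2], [])
      else (st.1, st.2 ++ [l]) := by
  rfl

lemma pvB_run (ow : String) (ls : List String) : ∀ (blocks : List (List String))
    (run : List String),
    (pvPass2 ow (let st := ls.foldl pvBStep (blocks, run); st.1 ++ [st.2]))
      = pvPass2 ow blocks ++ pvRunM ow (pvDOf ow run) ls := by
  induction ls with
  | nil =>
    intro blocks run
    simpa [pvRunM] using pv_pass2_snoc ow blocks run
  | cons l ls ih =>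
    intro blocks run
    rw [List.foldl_cons, pv_bstep_eq]
    by_cases h : pvBnd l = true
    · rw [if_pos h, ih, pv_pass2_snoc]
      have hseed : pvDOf ow [] = pvSeed0 ow := rfl
      simp [pvRunM, h, hseed, List.append_assoc]
    · rw [if_neg (by simp [h]), ih]
      have hfill : pvDOf ow (run ++ [l]) = pvFillA (pvDOf ow run) l := by
        unfold pvDOf
        rw [List.foldl_append]
        simp [pv_fill_eq]
      simp [pvRunM, h, hfill]

-- filling a non-'Def:' line never creates the 'definition' key
lemma pv_fill_keeps (d : PySem.Dict String String) (l : String)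
    (h : PySem.Str.startswith l "Def:" = false) :
    (pvFillA d l).contains "definition" = d.contains "definition" := by
  unfold pvFillA
  rw [h]
  split_ifs <;> first
  | exact ‹False›.elim
  | simp only [PySem.Dict.contains_insert,
      show (("definition" : String) == "parts") = false from by decide,
      show (("definition" : String) == "level") = false from by decide,
      show (("definition" : String) == "example") = false from by decide,
      show (("definition" : String) == "pronunciation") = false from by decide,
      Bool.false_or]

lemma pv_seed0_no_def (ow : String) : (pvSeed0 ow).contains "definition" = false := by
  unfold pvSeed0
  rw [PySem.Dict.contains_insert, PySem.Dict.contains_insert]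
  simp [PySem.Dict.contains_empty]

-- if the first block has no 'Def:' line, the seed dict is irrelevant
lemma pv_runM_congr (ow : String) (ls : List String) :
    ∀ (d1 d2 : PySem.Dict String String),
    (∀ l ∈ ls.takeWhile (fun l => !pvBnd l), PySem.Str.startswith l "Def:" = false) →
    d1.contains "definition" = false → d2.contains "definition" = false →
    pvRunM ow d1 ls = pvRunM ow d2 ls := by
  induction ls with
  | nil => intro d1 d2 _ h1 h2; simp [pvRunM, pvEmit, h1, h2]
  | cons l ls ih =>
    intro d1 d2 hpre h1 h2
    by_cases hb : pvBnd l = true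
    · simp [pvRunM, hb, pvEmit, h1, h2]
    · have hl : PySem.Str.startswith l "Def:" = false := by
        apply hpre
        rw [List.takeWhile_cons, if_pos (by simp [hb])]
        exact List.mem_cons_self
      have hpre' : ∀ x ∈ ls.takeWhile (fun l => !pvBnd l), PySem.Str.startswith x "Def:" = false := by
        intro x hx
        apply hpre
        rw [List.takeWhile_cons, if_pos (by simp [hb])]
        exact List.mem_cons_of_mem _ hx
      have hstep : ∀ d : PySem.Dict String String,
          pvRunM ow d (l :: ls) = pvRunM ow (pvFillA d l) ls := by
        intro d; simp [pvRunM, hb]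
      rw [hstep, hstep]
      exact ih _ _ hpre' (by rw [pv_fill_keeps d1 l hl]; exact h1)
        (by rw [pv_fill_keeps d2 l hl]; exact h2)

-- ===== VERDICT (by name: the statements are the Claim_ definitions above) =====
theorem parse_ai_response_spec : Claim_unchanged_parse_ai_response := by
  intro text ow _ hnd
  have hA : parse_ai_response text ow =
      (pvFin ((PySem.Str.splitlines text).foldl (pvStepA ow) ([], PySem.Dict.empty))).map
        (fun d => d.items) := rfl
  have hB : parse_ai_response_alt text ow =
      (pvPass2 ow
        (let st := ((PySem.Str.splitlines text).map PySem.Str.strip).foldl pvBStep ([], [])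
         st.1 ++ [st.2])).map (fun d => d.items) := rfl
  rw [hA, hB, pvA_run ow (PySem.Str.splitlines text) [] PySem.Dict.empty,
    pvB_run ow ((PySem.Str.splitlines text).map PySem.Str.strip) [] []]
  have hlam : (fun l : String => !(decide (l = "") || "---".toList.isPrefixOf l.toList
        || "Item".toList.isPrefixOf l.toList)) = (fun l : String => !pvBnd l) :=
    funext fun l => by rw [pv_bnd_alt]
  have hpre : ∀ l ∈ (((PySem.Str.splitlines text).map PySem.Str.strip).takeWhile
      (fun l => !pvBnd l)), PySem.Str.startswith l "Def:" = false := by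
    intro l hl
    by_contra hc
    apply hnd
    unfold D_parse_ai_response
    rw [hlam]
    exact List.any_eq_true.2 ⟨l, hl, by rw [pv_pre_alt]; simpa using hc⟩
  rw [pv_runM_congr ow _ PySem.Dict.empty (pvDOf ow [])
    hpre (by simp [PySem.Dict.contains_empty]) (pv_seed0_no_def ow)]
  rfl

theorem parse_ai_response_changed : Claim_changed_parse_ai_response := by
  unfold Claim_changed_parse_ai_response; decide

-- ---- tightness: inside D_ the two results differ (B's first item carries 'word', A's never does) ----

lemma pv_fill_keeps_word (d : PySem.Dict String String) (l : String) :
    (pvFillA d l).contains "word" = d.contains "word" := by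
  unfold pvFillA
  split_ifs <;>
    simp only [PySem.Dict.contains_insert,
      show (("word" : String) == "parts") = false from by decide,
      show (("word" : String) == "level") = false from by decide,
      show (("word" : String) == "definition") = false from by decide,
      show (("word" : String) == "example") = false from by decide,
      show (("word" : String) == "pronunciation") = false from by decide,
      Bool.false_or]

lemma pv_fill_mono_def (d : PySem.Dict String String) (l : String)
    (h : d.contains "definition" = true) : (pvFillA d l).contains "definition" = true := by
  unfold pvFillA
  split_ifs <;> simp [PySem.Dict.contains_insert, h]

lemma pv_fill_def_of_def (d : PySem.Dict String String) (l : String)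
    (h : PySem.Str.startswith l "Def:" = true) :
    (pvFillA d l).contains "definition" = true := by
  obtain ⟨t2, ht2⟩ := (PySem.Chars.startswith_iff _ _).1 (by simpa using h)
  unfold pvFillA
  split_ifs with h1 h2
  · exfalso
    obtain ⟨t1, ht1⟩ := (PySem.Chars.startswith_iff _ _).1 (by simpa using h1)
    rw [← ht1] at ht2; simp at ht2
  · exfalso
    obtain ⟨t1, ht1⟩ := (PySem.Chars.startswith_iff _ _).1 (by simpa using h2)
    rw [← ht1] at ht2; simp at ht2
  · simp

lemma pv_insert_head (ow : String) (d : PySem.Dict String String) (k v : String)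
    (hk : (("word" : String) == k) = false)
    (hd : d.items.head? = some ("word", ow)) :
    ((d.insert k v).items).head? = some ("word", ow) := by
  rw [PySem.Dict.items_insert]
  rcases d with ⟨its⟩
  cases its with
  | nil => simp at hd
  | cons p t =>
    have hp : p = ("word", ow) := by simpa using hd
    subst hp
    by_cases hc : (PySem.Dict.mk (("word", ow) :: t)).contains k = true
    · simp [hc]
      intro he
      rw [← he] at hk
      simp at hk
    · simp [hc]

lemma pv_fill_head (ow : String) (d : PySem.Dict String String) (l : String)
    (hd : d.items.head? = some ("word", ow)) :
    ((pvFillA d l).items).head? = some ("word", ow) := by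
  unfold pvFillA
  split_ifs <;>
    first
    | exact pv_insert_head ow d _ _ (by decide) hd
    | exact hd

lemma pv_head_mem_contains (d : PySem.Dict String String) (p : String × String)
    (h : d.items.head? = some p) : d.contains p.1 = true := by
  rw [PySem.Dict.contains_iff_mem_keys]
  rcases d with ⟨its⟩
  cases its with
  | nil => simp at h
  | cons q t =>
    have : q = p := by simpa using h
    subst this
    simp [PySem.Dict.keys]

lemma pv_runM_ne (ow : String) (ls : List String) :
    ∀ (d1 d2 : PySem.Dict String String),
    d1.contains "word" = false →
    d2.items.head? = some ("word", ow) →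
    ((ls.takeWhile (fun l => !pvBnd l)).any (fun l => PySem.Str.startswith l "Def:") = true
      ∨ (d1.contains "definition" = true ∧ d2.contains "definition" = true)) →
    (pvRunM ow d1 ls).map (fun d => d.items) ≠ (pvRunM ow d2 ls).map (fun d => d.items) := by
  induction ls with
  | nil =>
    intro d1 d2 hw hh htr
    rcases htr with h | ⟨h1, h2⟩
    · simp at h
    · simp only [pvRunM, pvEmit, h1, h2, if_pos]
      intro hcon
      have : d1.items = d2.items := by simpa using hcon
      have hh1 : d1.items.head? = some ("word", ow) := by rw [this]; exact hh
      have := pv_head_mem_contains d1 _ hh1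
      simp [this] at hw
  | cons l ls ih =>
    intro d1 d2 hw hh htr
    by_cases hb : pvBnd l = true
    · have htr' : d1.contains "definition" = true ∧ d2.contains "definition" = true := by
        rcases htr with h | h
        · rw [List.takeWhile_cons, if_neg (by simp [hb])] at h; simp at h
        · exact h
      simp only [pvRunM, hb, if_pos, pvEmit, htr'.1, htr'.2, List.map_append]
      intro hcon
      have : d1.items = d2.items := by simpa using congrArg List.head? hcon
      have hh1 : d1.items.head? = some ("word", ow) := by rw [this]; exact hh
      have := pv_head_mem_contains d1 _ hh1
      simp [this] at hw
    · have hstep : ∀ d : PySem.Dict String String,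
          pvRunM ow d (l :: ls) = pvRunM ow (pvFillA d l) ls := by
        intro d; simp [pvRunM, hb]
      rw [hstep, hstep]
      apply ih
      · rw [pv_fill_keeps_word]; exact hw
      · exact pv_fill_head ow d2 l hh
      · by_cases hdl : PySem.Str.startswith l "Def:" = true
        · exact Or.inr ⟨pv_fill_def_of_def d1 l hdl, pv_fill_def_of_def d2 l hdl⟩
        · rcases htr with h | ⟨h1, h2⟩
          · rw [List.takeWhile_cons, if_pos (by simp [hb])] at h
            simp only [List.any_cons, hdl, Bool.false_or] at h
            exact Or.inl h
          · exact Or.inr ⟨pv_fill_mono_def d1 l h1, pv_fill_mono_def d2 l h2⟩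

theorem parse_ai_response_tight : Claim_exact_parse_ai_response := by
  intro text ow _ hd hcon
  have hA : parse_ai_response text ow =
      (pvFin ((PySem.Str.splitlines text).foldl (pvStepA ow) ([], PySem.Dict.empty))).map
        (fun d => d.items) := rfl
  have hB : parse_ai_response_alt text ow =
      (pvPass2 ow
        (let st := ((PySem.Str.splitlines text).map PySem.Str.strip).foldl pvBStep ([], [])
         st.1 ++ [st.2])).map (fun d => d.items) := rfl
  have hA2 : parse_ai_response text ow =
      (pvRunM ow PySem.Dict.empty ((PySem.Str.splitlines text).map PySem.Str.strip)).map
        (fun d => d.items) := by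
    rw [hA, pvA_run ow (PySem.Str.splitlines text) [] PySem.Dict.empty, List.nil_append]
  have hB2 : parse_ai_response_alt text ow =
      (pvRunM ow (pvDOf ow []) ((PySem.Str.splitlines text).map PySem.Str.strip)).map
        (fun d => d.items) := by
    rw [hB, pvB_run ow ((PySem.Str.splitlines text).map PySem.Str.strip) [] []]
    rfl
  have hlam : (fun l : String => !(decide (l = "") || "---".toList.isPrefixOf l.toList
        || "Item".toList.isPrefixOf l.toList)) = (fun l : String => !pvBnd l) :=
    funext fun l => by rw [pv_bnd_alt]
  have hlamD : (fun l : String => "Def:".toList.isPrefixOf l.toList)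
      = (fun l : String => PySem.Str.startswith l "Def:") :=
    funext fun l => pv_pre_alt l "Def:"
  unfold D_parse_ai_response at hd
  rw [hlam, hlamD] at hd
  have hhead : (pvDOf ow []).items.head? = some ("word", ow) := rfl
  exact pv_runM_ne ow ((PySem.Str.splitlines text).map PySem.Str.strip)
    PySem.Dict.empty (pvDOf ow []) (by simp [PySem.Dict.contains_empty]) hhead (Or.inl hd)
    (by rw [← hA2, ← hB2]; exact hcon)
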